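-- pv_equiv track=rewrite | github.com/Mirzohid2001/Logistika-mirzohid-bexruz | analytics/services.py | last_n_calendar_months_end_at
-- ===== SOURCE A (Python) =====
-- def last_n_calendar_months_end_at(year: int, month: int, n: int = 6) -> list[tuple[int, int]]:
--     """Oxirgi oy inclusive; oldinga n-1 oy (jami n ta oy)."""
--     out: list[tuple[int, int]] = []
--     y, m = year, month
--     for _ in range(n):
--         out.append((y, m))
--         m -= 1
--         if m == 0:
--             m = 12
--             y -= 1
--     out.reverse()
--     return out
-- ===== SOURCE B (Python) =====
-- def last_n_calendar_months_end_at(year: int, month: int, n: int = 6) -> list[tuple[int, int]]: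
--     if n <= 0:
--         return []
--     if not 1 <= month <= 12:
--         raise ValueError("month must be in 1..12")
--     total = year * 12 + (month - 1)
--     return [(i // 12, i % 12 + 1) for i in range(total - (n - 1), total + 1)]
-- ===== Notes on version B (the rewrite author's own statement) =====
-- stated objective: simpler
-- what changed: Replaces the stateful decrement-and-wrap loop plus final reverse by a closed-form absolute month index (each (year, month) pair computed independently by divmod over an ascending range), returns [] immediately when no months are requested, and validates that month is a real calendar month.
-- outside the precondition, e.g. on last_n_calendar_months_end_at(2020, 0, 1): A returns [(2020, 0)], B raises ValueError; on last_n_calendar_months_end_at(2020, 13, 2): A returns [(2020, 12), (2020, 13)], B raises ValueError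
import Mathlib
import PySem

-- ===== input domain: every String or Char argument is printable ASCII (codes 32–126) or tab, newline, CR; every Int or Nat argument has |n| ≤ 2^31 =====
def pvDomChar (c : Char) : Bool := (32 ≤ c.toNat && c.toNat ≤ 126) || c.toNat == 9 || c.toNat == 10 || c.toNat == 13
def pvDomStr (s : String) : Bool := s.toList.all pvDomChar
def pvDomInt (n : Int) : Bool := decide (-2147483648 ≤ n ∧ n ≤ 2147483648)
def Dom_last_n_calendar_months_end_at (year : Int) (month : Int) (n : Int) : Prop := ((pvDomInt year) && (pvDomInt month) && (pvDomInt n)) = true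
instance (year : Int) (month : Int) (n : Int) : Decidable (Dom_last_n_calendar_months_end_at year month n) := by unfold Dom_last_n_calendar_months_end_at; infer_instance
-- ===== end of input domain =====

-- B replaces A's decrement-and-wrap loop (plus final reverse) by closed-form divmod over an
-- absolute month index, and validates the month argument (raises ValueError outside 1..12,
-- where A returns un-normalized pairs; those inputs are outside Pre_ below).

-- ===== PORT A =====
-- one iteration of A's loop body on the state (out, y, m)
def pvStepA (st : List (Int × Int) × Int × Int) : List (Int × Int) × Int × Int :=
  let out := st.1 ++ [(st.2.1, st.2.2)]
  let m := st.2.2 - 1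
  if m = 0 then (out, st.2.1 - 1, 12) else (out, st.2.1, m)

def last_n_calendar_months_end_at (year : Int) (month : Int) (n : Int) : List (Int × Int) :=
  ((PySem.List.pyRange 0 n 1).foldl (fun st _ => pvStepA st) ([], year, month)).1.reverse

-- ===== PORT B =====
-- the comprehension's element function: i ↦ (i // 12, i % 12 + 1)
def pvF (i : Int) : Int × Int := (PySem.Int.floordiv i 12, PySem.Int.mod i 12 + 1)

def last_n_calendar_months_end_at_alt (year : Int) (month : Int) (n : Int) : List (Int × Int) :=
  if n ≤ 0 then []
  else if 1 ≤ month ∧ month ≤ 12 then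
    let total := year * 12 + (month - 1)
    (PySem.List.pyRange (total - (n - 1)) (total + 1) 1).map pvF
  else []  -- Python B raises ValueError here; outside Pre_, nothing is claimed

-- ===== PRECONDITION & SPEC =====
-- Pre_ excludes non-calendar month inputs (month < 1 or month > 12) when n ≥ 1 months are
-- requested: there A's loop, which only wraps when the month hits exactly 0, returns
-- un-normalized pairs such as (year, 0) or (year, 13) — an artefact of its implementation —
-- while B validates and raises ValueError.
def Pre_last_n_calendar_months_end_at (year : Int) (month : Int) (n : Int) : Prop :=
  (1 ≤ month ∧ month ≤ 12) ∨ n ≤ 0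
instance (year : Int) (month : Int) (n : Int) : Decidable (Pre_last_n_calendar_months_end_at year month n) := by unfold Pre_last_n_calendar_months_end_at; infer_instance

def pvWitness_last_n_calendar_months_end_at : Int × Int × Int := (2024, 3, 6)

def Spec_last_n_calendar_months_end_at (year : Int) (month : Int) (n : Int) (out : List (Int × Int)) : Prop := out = last_n_calendar_months_end_at_alt year month n
instance (year : Int) (month : Int) (n : Int) (out : List (Int × Int)) : Decidable (Spec_last_n_calendar_months_end_at year month n out) := by unfold Spec_last_n_calendar_months_end_at; infer_instance

-- ===== CLAIM (what is proved, stated in full; the proofs are below) =====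
def Claim_equal_last_n_calendar_months_end_at : Prop := ∀ (year : Int) (month : Int) (n : Int), Dom_last_n_calendar_months_end_at year month n → Pre_last_n_calendar_months_end_at year month n → Spec_last_n_calendar_months_end_at year month n (last_n_calendar_months_end_at year month n)

-- ===== LEMMAS AND PROOFS =====

theorem pvF_eq (y m : Int) (h1 : 1 ≤ m) (h2 : m ≤ 12) : pvF (y * 12 + (m - 1)) = (y, m) := by
  unfold pvF
  rw [PySem.Int.floordiv_eq_ediv_of_pos (by norm_num), PySem.Int.mod_eq_emod_of_pos (by norm_num)]
  simp only [Prod.mk.injEq]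
  constructor <;> omega

theorem pvStepA_eq (acc : List (Int × Int)) (y m : Int) :
    pvStepA (acc, y, m) = (acc ++ [(y, m)], if m = 1 then (y - 1, 12) else (y, m - 1)) := by
  simp only [pvStepA]
  by_cases hm : m = 1
  · subst hm; norm_num
  · rw [if_neg (by omega : ¬ (m - 1 = 0)), if_neg hm]

-- A's loop invariant: starting from a calendar state (1 ≤ m ≤ 12), folding the step over any
-- list appends the reversed divmod images of the descending absolute-month-index range.
theorem pvLoop (l : List Int) : ∀ (acc : List (Int × Int)) (y m : Int), 1 ≤ m → m ≤ 12 →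
    (l.foldl (fun st _ => pvStepA st) (acc, y, m)).1
      = acc ++ ((PySem.List.pyRange (y * 12 + (m - 1) - l.length + 1) (y * 12 + (m - 1) + 1) 1).map pvF).reverse := by
  induction l with
  | nil =>
    intro acc y m _ _
    rw [PySem.List.pyRange_one_eq_nil (by simp)]
    simp
  | cons a l ih =>
    intro acc y m h1 h2
    obtain ⟨y', m', hy'm', hm1, hm2, hts⟩ :
        ∃ y' m', (if m = 1 then (y - 1, 12) else (y, m - 1)) = (y', m') ∧ 1 ≤ m' ∧ m' ≤ 12 ∧
          y' * 12 + (m' - 1) = y * 12 + (m - 1) - 1 := by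
      by_cases hm : m = 1
      · exact ⟨y - 1, 12, by rw [if_pos hm], by norm_num, by norm_num, by subst hm; ring⟩
      · exact ⟨y, m - 1, by rw [if_neg hm], by omega, by omega, by ring⟩
    simp only [List.foldl_cons]
    rw [pvStepA_eq, hy'm', ih (acc ++ [(y, m)]) y' m' hm1 hm2, hts]
    have hlow : y * 12 + (m - 1) - 1 - (l.length : Int) + 1
        = y * 12 + (m - 1) - (((a :: l).length : Int)) + 1 := by
      simp only [List.length_cons]; push_cast; ring
    have hup : y * 12 + (m - 1) - 1 + 1 = y * 12 + (m - 1) := by ring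
    rw [hlow, hup,
      PySem.List.pyRange_one_succ_right
        (show y * 12 + (m - 1) - (((a :: l).length : Int)) + 1 ≤ y * 12 + (m - 1) by omega)]
    simp [pvF_eq y m h1 h2]

theorem last_n_calendar_months_end_at_spec : Claim_equal_last_n_calendar_months_end_at := by
  intro year month n _ hpre
  unfold Spec_last_n_calendar_months_end_at
  by_cases hn : n ≤ 0
  · simp only [last_n_calendar_months_end_at, last_n_calendar_months_end_at_alt, if_pos hn]
    rw [PySem.List.pyRange_one_eq_nil (by omega : n ≤ 0)]
    rfl
  · have hm : 1 ≤ month ∧ month ≤ 12 := by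
      rcases hpre with h | h
      · exact h
      · omega
    obtain ⟨hm1, hm2⟩ := hm
    simp only [last_n_calendar_months_end_at, last_n_calendar_months_end_at_alt,
      if_neg hn, if_pos (⟨hm1, hm2⟩ : 1 ≤ month ∧ month ≤ 12)]
    rw [pvLoop (PySem.List.pyRange 0 n 1) [] year month hm1 hm2]
    have hlen : ((PySem.List.pyRange 0 n 1).length : Int) = n := by
      rw [PySem.List.length_pyRange_one]; omega
    rw [hlen]
    simp only [List.nil_append, List.reverse_reverse]
    have e : year * 12 + (month - 1) - n + 1 = year * 12 + (month - 1) - (n - 1) := by ring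
    rw [e]
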